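-- pv_equiv track=rewrite | github.com/ericbgarnick/AOC | y2015/day17/day17.py | fill_bottles
-- ===== SOURCE A (Python) =====
-- from typing import List
--
-- TARGET_VOLUME = 150
--
-- def fill_bottles(
--         bottles_avail: List[int],
--         cur_vol: int = 0,
--         bottles_used: int = 0,
--         combos: List[int] = None
-- ) -> List[int]:
--     combos = combos or []
--     if cur_vol == TARGET_VOLUME:
--         combos.append(bottles_used)
--     elif cur_vol < TARGET_VOLUME and len(bottles_avail):
--         for idx, bottle in enumerate(bottles_avail):
--             combos += fill_bottles(bottles_avail[idx + 1:], cur_vol + bottle, bottles_used + 1)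
--     return combos
-- ===== SOURCE B (Python) =====
-- # B: explicit-stack worklist instead of recursion; same return value.
-- # Note: A mutates a passed-in non-empty `combos` list in place; B never
-- # mutates its arguments — the equivalence claimed is about the return value.
-- TARGET_VOLUME = 150
--
--
-- def fill_bottles(bottles_avail, cur_vol=0, bottles_used=0, combos=None):
--     out = list(combos or [])
--     stack = [(bottles_avail, cur_vol, bottles_used)]
--     while stack:
--         avail, vol, used = stack.pop()
--         if vol == TARGET_VOLUME:
--             out.append(used)
--         elif vol < TARGET_VOLUME:
--             # push children in reverse index order so idx 0 is processed first
--             for idx in range(len(avail) - 1, -1, -1):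
--                 stack.append((avail[idx + 1:], vol + avail[idx], used + 1))
--     return out
-- ===== Notes on version B (the rewrite author's own statement) =====
-- stated objective: alternative
-- what changed: Replaces the recursive DFS with an explicit-stack worklist loop (children pushed in reverse index order to preserve the exact output order); B also never mutates the caller's combos list.
import Mathlib
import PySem

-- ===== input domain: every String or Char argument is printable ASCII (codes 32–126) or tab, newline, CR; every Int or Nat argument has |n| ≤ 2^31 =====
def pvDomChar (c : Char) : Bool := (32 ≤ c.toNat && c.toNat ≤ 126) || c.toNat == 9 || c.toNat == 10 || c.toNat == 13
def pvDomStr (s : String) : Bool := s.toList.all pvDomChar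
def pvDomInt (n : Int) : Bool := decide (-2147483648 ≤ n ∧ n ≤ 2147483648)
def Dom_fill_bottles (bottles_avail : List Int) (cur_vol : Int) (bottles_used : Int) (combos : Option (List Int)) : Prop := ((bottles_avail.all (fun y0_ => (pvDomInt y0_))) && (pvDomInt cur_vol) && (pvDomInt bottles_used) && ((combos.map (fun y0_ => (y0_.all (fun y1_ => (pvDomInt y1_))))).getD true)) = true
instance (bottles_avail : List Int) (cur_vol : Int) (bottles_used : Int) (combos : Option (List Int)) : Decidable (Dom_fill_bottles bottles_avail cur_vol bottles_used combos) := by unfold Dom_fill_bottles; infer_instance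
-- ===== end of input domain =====

-- B replaces A's recursive DFS by an explicit-stack worklist (same enumeration
-- order, same cost); equivalence is about the RETURN value only: Python A
-- mutates a passed-in non-empty `combos` list in place, B does not.

-- ===== PORT A =====
-- A's `for idx, bottle in enumerate(...)` with slice `bottles_avail[idx+1:]`
-- is ported as recursion over successive tails: at index idx the head of the
-- remaining list is `bottle` and its tail is exactly the slice — step for step
-- the same values.  `combos or []` (falsy = None or empty list) is the match.
mutual
def fill_bottles (bottles_avail : List Int) (cur_vol : Int) (bottles_used : Int) (combos : Option (List Int)) : List Int :=
  let combos0 : List Int := match combos with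
    | none => []
    | some l => if l = [] then [] else l
  if cur_vol = 150 then combos0 ++ [bottles_used]
  else if cur_vol < 150 ∧ bottles_avail.length ≠ 0 then
    fill_bottles_go bottles_avail cur_vol bottles_used combos0
  else combos0
termination_by (bottles_avail.length, 1)

-- the `for` loop: combos += fill_bottles(bottles_avail[idx+1:], cur_vol+bottle, bottles_used+1)
def fill_bottles_go (rest : List Int) (cur_vol : Int) (bottles_used : Int) (acc : List Int) : List Int :=
  match rest with
  | [] => acc
  | bottle :: tl =>
      fill_bottles_go tl cur_vol bottles_used
        (acc ++ fill_bottles tl (cur_vol + bottle) (bottles_used + 1) none)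
termination_by (rest.length, 0)
decreasing_by
  all_goals simp [Prod.lex_def]
end

-- ===== PORT B =====
-- B's stack has its top at Python's list end; the Lean list holds the top at
-- its head.  Pushing the child frames in reverse index order in Python makes
-- idx 0 the new top, i.e. the new stack is (children in index order) ++ rest.
def fill_bottles_children : List Int → Int → Int → List (List Int × Int × Int)
  | [], _, _ => []
  | b :: tl, vol, used => (tl, vol + b, used + 1) :: fill_bottles_children tl vol used

def fill_bottles_stackMeasure (stack : List (List Int × Int × Int)) : Nat :=
  (stack.map (fun f => 2 ^ f.1.length)).sum

theorem fill_bottles_children_measure (avail : List Int) (vol used : Int) :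
    fill_bottles_stackMeasure (fill_bottles_children avail vol used) = 2 ^ avail.length - 1 := by
  induction avail generalizing vol used with
  | nil => rfl
  | cons b tl ih =>
      have h1 : 1 ≤ 2 ^ tl.length := Nat.one_le_two_pow
      simp [fill_bottles_children, fill_bottles_stackMeasure, List.map, List.sum_cons,
        pow_succ] at *
      rw [ih]
      omega

theorem fill_bottles_stackMeasure_append (a b : List (List Int × Int × Int)) :
    fill_bottles_stackMeasure (a ++ b) = fill_bottles_stackMeasure a + fill_bottles_stackMeasure b := by
  simp [fill_bottles_stackMeasure]

theorem fill_bottles_measure_rest_lt (avail : List Int) (vol used : Int) (rest : List (List Int × Int × Int)) :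
    fill_bottles_stackMeasure rest < fill_bottles_stackMeasure ((avail, vol, used) :: rest) := by
  have h1 : 1 ≤ 2 ^ avail.length := Nat.one_le_two_pow
  simp [fill_bottles_stackMeasure]

theorem fill_bottles_measure_children_lt (avail : List Int) (vol used : Int) (rest : List (List Int × Int × Int)) :
    fill_bottles_stackMeasure (fill_bottles_children avail vol used ++ rest) <
      fill_bottles_stackMeasure ((avail, vol, used) :: rest) := by
  have h1 : 1 ≤ 2 ^ avail.length := Nat.one_le_two_pow
  rw [fill_bottles_stackMeasure_append, fill_bottles_children_measure]
  simp [fill_bottles_stackMeasure]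

-- the `while stack:` loop
def fill_bottles_altLoop (stack : List (List Int × Int × Int)) (out : List Int) : List Int :=
  match stack with
  | [] => out
  | (avail, vol, used) :: rest =>
      if vol = 150 then fill_bottles_altLoop rest (out ++ [used])
      else if vol < 150 then
        fill_bottles_altLoop (fill_bottles_children avail vol used ++ rest) out
      else fill_bottles_altLoop rest out
termination_by fill_bottles_stackMeasure stack
decreasing_by
  · exact fill_bottles_measure_rest_lt avail vol used rest
  · exact fill_bottles_measure_children_lt avail vol used rest
  · exact fill_bottles_measure_rest_lt avail vol used rest

def fill_bottles_alt (bottles_avail : List Int) (cur_vol : Int) (bottles_used : Int) (combos : Option (List Int)) : List Int :=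
  -- out = list(combos or []): same VALUE as combos.getD [] (a copy in Python)
  let out : List Int := combos.getD []
  fill_bottles_altLoop [(bottles_avail, cur_vol, bottles_used)] out

-- ===== PRECONDITION & SPEC =====
def Spec_fill_bottles (bottles_avail : List Int) (cur_vol : Int) (bottles_used : Int) (combos : Option (List Int)) (out : List Int) : Prop := out = fill_bottles_alt bottles_avail cur_vol bottles_used combos
instance (bottles_avail : List Int) (cur_vol : Int) (bottles_used : Int) (combos : Option (List Int)) (out : List Int) : Decidable (Spec_fill_bottles bottles_avail cur_vol bottles_used combos out) := by unfold Spec_fill_bottles; infer_instance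

-- ===== CLAIM (what is proved, stated in full; the proofs are below) =====
def Claim_equal_fill_bottles : Prop := ∀ (bottles_avail : List Int) (cur_vol : Int) (bottles_used : Int) (combos : Option (List Int)), Dom_fill_bottles bottles_avail cur_vol bottles_used combos → Spec_fill_bottles bottles_avail cur_vol bottles_used combos (fill_bottles bottles_avail cur_vol bottles_used combos)

-- ===== LEMMAS AND PROOFS =====

-- the accumulator of A's loop is a pure prefix
theorem fill_bottles_go_acc (rest : List Int) (cur_vol bottles_used : Int) (acc : List Int) :
    fill_bottles_go rest cur_vol bottles_used acc = acc ++ fill_bottles_go rest cur_vol bottles_used [] := by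
  induction rest generalizing acc with
  | nil => simp [fill_bottles_go]
  | cons b tl ih =>
      rw [fill_bottles_go, fill_bottles_go,
        ih (acc ++ fill_bottles tl (cur_vol + b) (bottles_used + 1) none),
        ih ([] ++ fill_bottles tl (cur_vol + b) (bottles_used + 1) none)]
      simp

-- A with any `combos` = the `or []` prefix followed by A run from an empty list
theorem fill_bottles_combos (bottles_avail : List Int) (cur_vol bottles_used : Int) (combos : Option (List Int)) :
    fill_bottles bottles_avail cur_vol bottles_used combos =
      combos.getD [] ++ fill_bottles bottles_avail cur_vol bottles_used none := by
  have hc : (match combos with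
      | none => ([] : List Int)
      | some l => if l = [] then [] else l) = combos.getD [] := by
    cases combos with
    | none => rfl
    | some l => cases l <;> simp
  rw [fill_bottles.eq_def, fill_bottles.eq_def]
  simp only [hc]
  split_ifs with h1 h2
  · simp
  · rw [fill_bottles_go_acc _ _ _ (combos.getD [])]
  · simp

-- processing one frame of B's stack contributes exactly A's result for it
theorem fill_bottles_main (n : Nat) :
    ∀ (avail : List Int), avail.length < n → ∀ (vol used : Int) (rest : List (List Int × Int × Int)) (out : List Int),
      fill_bottles_altLoop ((avail, vol, used) :: rest) out =
        fill_bottles_altLoop rest (out ++ fill_bottles avail vol used none) := by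
  induction n with
  | zero => intro avail h; omega
  | succ n ih =>
      have chain : ∀ (avail : List Int), avail.length < n.succ → ∀ (vol used : Int) rest out,
          fill_bottles_altLoop (fill_bottles_children avail vol used ++ rest) out =
            fill_bottles_altLoop rest (out ++ fill_bottles_go avail vol used []) := by
        intro avail
        induction avail with
        | nil => intro _ vol used rest out; simp [fill_bottles_children, fill_bottles_go]
        | cons b tl ih2 =>
            intro hlen vol used rest out
            have htl : tl.length < n.succ := by simp at hlen; omega
            have hstep : tl.length < n := by simp at hlen; omega
            rw [fill_bottles_children, List.cons_append]
            rcases Nat.eq_zero_or_pos n with hn | hn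
            · omega
            · rw [ih tl hstep (vol + b) (used + 1)
                (fill_bottles_children tl vol used ++ rest) out,
                ih2 htl vol used rest]
              rw [fill_bottles_go,
                fill_bottles_go_acc tl vol used ([] ++ fill_bottles tl (vol + b) (used + 1) none)]
              simp
      intro avail hlen vol used rest out
      rw [fill_bottles_altLoop, fill_bottles.eq_def]
      by_cases h1 : vol = 150
      · simp [h1]
      · rw [if_neg h1, if_neg h1]
        by_cases h2 : vol < 150
        · rw [if_pos h2]
          by_cases h3 : avail.length ≠ 0
          · rw [if_pos ⟨h2, h3⟩]
            exact chain avail hlen vol used rest out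
          · have hav : avail = [] := List.eq_nil_of_length_eq_zero (by omega)
            subst hav
            rw [if_neg (by simp)]
            simp [fill_bottles_children]
        · rw [if_neg h2, if_neg (by tauto)]
          simp

-- ===== VERDICT (by name: the statement is the Claim_ definition above) =====
theorem fill_bottles_spec : Claim_equal_fill_bottles := by
  intro bottles_avail cur_vol bottles_used combos _
  unfold Spec_fill_bottles fill_bottles_alt
  rw [fill_bottles_main (bottles_avail.length + 1) bottles_avail (by omega) cur_vol bottles_used
      [] (combos.getD []),
    fill_bottles_altLoop, fill_bottles_combos]
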